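-- pv_equiv track=rewrite | github.com/Retrocky/ParentsEvening | main.py | prioritySorter
-- ===== SOURCE A (Python) =====
-- def prioritySorter(priorityDict):
--     sortedList = []
--     flipped = {}
--     for key, value in priorityDict.items():
--         if value not in flipped:
--             flipped[value] = [key]
--         else:
--             flipped[value].append(key)
--     for weight in range(1, 4):
--         if weight in list(flipped.keys()):
--             for i in range(len(flipped[weight])):
--                 sortedList.append(flipped[weight][i])
--     return [i for i in reversed(sortedList)]
-- ===== SOURCE B (Python) =====
-- def prioritySorter(priorityDict):
--     eligible = [(k, v) for k, v in reversed(list(priorityDict.items())) if v in (1, 2, 3)]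
--     return [k for k, _ in sorted(eligible, key=lambda p: p[1], reverse=True)]
-- ===== Notes on version B (the rewrite author's own statement) =====
-- stated objective: alternative
-- what changed: B replaces A's value->keys bucket dictionary, the weight-1..3 loop of index loops and the final whole-list reversal by a single stable descending sort (by value) of the eligible items taken in reversed order.
import Mathlib
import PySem

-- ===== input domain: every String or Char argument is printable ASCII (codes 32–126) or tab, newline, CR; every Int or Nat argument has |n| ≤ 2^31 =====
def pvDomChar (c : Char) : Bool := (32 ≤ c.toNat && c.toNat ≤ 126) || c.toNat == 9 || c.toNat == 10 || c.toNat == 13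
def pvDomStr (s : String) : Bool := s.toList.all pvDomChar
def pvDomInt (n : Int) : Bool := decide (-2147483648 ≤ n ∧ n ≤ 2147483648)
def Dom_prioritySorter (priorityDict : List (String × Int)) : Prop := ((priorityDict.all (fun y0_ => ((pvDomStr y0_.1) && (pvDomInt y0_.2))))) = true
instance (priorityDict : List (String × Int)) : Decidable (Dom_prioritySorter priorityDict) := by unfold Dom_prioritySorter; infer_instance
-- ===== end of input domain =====

-- B replaces A's bucket dict + weight loop + final reversal by one stable descending
-- sort (by value) of the reversed eligible items — an alternative decomposition, not faster.

-- ===== PORT A =====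
def prioritySorter (priorityDict : List (String × Int)) : List String :=
  -- flipped: dict value -> list of keys, built exactly as A's first loop
  let flipped : PySem.Dict Int (List String) :=
    priorityDict.foldl (fun flipped kv =>
      if flipped.contains kv.2 = false then flipped.insert kv.2 [kv.1]
      else flipped.insert kv.2 ((flipped.getD kv.2 []) ++ [kv.1])) PySem.Dict.empty
  -- second loop: for weight in range(1, 4): if weight in keys: index loop appending
  let sortedList : List String :=
    (PySem.List.pyRange 1 4).foldl (fun acc w =>
      if flipped.keys.contains w then
        (PySem.List.pyRange 0 ((flipped.getD w []).length : Int)).foldl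
          (fun acc2 i => acc2 ++ [PySem.List.pyGetD (flipped.getD w []) i ""]) acc
      else acc) []
  -- [i for i in reversed(sortedList)]
  sortedList.reverse

-- ===== PORT B =====
def prioritySorter_alt (priorityDict : List (String × Int)) : List String :=
  let eligible : List (String × Int) :=
    priorityDict.reverse.filter (fun p => p.2 == 1 || p.2 == 2 || p.2 == 3)
  (PySem.List.sorted eligible (fun p => p.2) true).map (fun p => p.1)

-- ===== PRECONDITION & SPEC =====
def Spec_prioritySorter (priorityDict : List (String × Int)) (out : List String) : Prop := out = prioritySorter_alt priorityDict
instance (priorityDict : List (String × Int)) (out : List String) : Decidable (Spec_prioritySorter priorityDict out) := by unfold Spec_prioritySorter; infer_instance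

-- ===== CLAIM (what is proved, stated in full; the proofs are below) =====
def Claim_equal_prioritySorter : Prop := ∀ (priorityDict : List (String × Int)), Dom_prioritySorter priorityDict → Spec_prioritySorter priorityDict (prioritySorter priorityDict)

-- ===== LEMMAS AND PROOFS =====

-- insertBy walks past a block it does not go before
lemma insertBy_append_of_not_before {α : Type} (before : α → α → Bool) (x : α)
    (l rest : List α) (h : ∀ y ∈ l, before x y = false) :
    PySem.List.insertBy before x (l ++ rest) = l ++ PySem.List.insertBy before x rest := by
  induction l with
  | nil => simp
  | cons y t ih =>
      have hy : before x y = false := h y (by simp)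
      simp [PySem.List.insertBy, hy, ih (fun z hz => h z (by simp [hz]))]

-- insertBy puts x in front of a block it goes before everywhere
lemma insertBy_of_forall_before {α : Type} (before : α → α → Bool) (x : α)
    (l : List α) (h : ∀ y ∈ l, before x y = true) :
    PySem.List.insertBy before x l = x :: l := by
  cases l with
  | nil => simp [PySem.List.insertBy]
  | cons y t => simp [PySem.List.insertBy, h y (by simp)]

-- the stable descending insertion sort of a {1,2,3}-valued list is the three filters
lemma sortAux (ys a3 a2 a1 : List (String × Int))
    (h3 : ∀ p ∈ a3, p.2 = 3) (h2 : ∀ p ∈ a2, p.2 = 2) (h1 : ∀ p ∈ a1, p.2 = 1)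
    (hy : ∀ p ∈ ys, p.2 = 1 ∨ p.2 = 2 ∨ p.2 = 3) :
    ys.foldl (fun acc x => PySem.List.insertBy
        (fun a b : String × Int => decide (b.2 < a.2)) x acc) (a3 ++ (a2 ++ a1))
    = (a3 ++ ys.filter (fun p => p.2 == 3)) ++ ((a2 ++ ys.filter (fun p => p.2 == 2))
        ++ (a1 ++ ys.filter (fun p => p.2 == 1))) := by
  induction ys generalizing a3 a2 a1 with
  | nil => simp
  | cons x t ih =>
      have hx := hy x (by simp)
      have ht : ∀ p ∈ t, p.2 = 1 ∨ p.2 = 2 ∨ p.2 = 3 := fun p hp => hy p (by simp [hp])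
      rcases hx with hx | hx | hx
      · -- x.2 = 1 : goes to the very end
        have hall : ∀ y ∈ a3 ++ (a2 ++ a1),
            (fun a b : String × Int => decide (b.2 < a.2)) x y = false := by
          intro y hy'
          simp only [List.mem_append] at hy'
          rcases hy' with hy' | hy' | hy'
          · simp [h3 y hy', hx]
          · simp [h2 y hy', hx]
          · simp [h1 y hy', hx]
        have hins : PySem.List.insertBy (fun a b : String × Int => decide (b.2 < a.2)) x
            (a3 ++ (a2 ++ a1)) = a3 ++ (a2 ++ (a1 ++ [x])) := by
          rw [PySem.List.insertBy_of_forall_not_before _ _ _ hall]; simp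
        have hih := ih a3 a2 (a1 ++ [x]) h3 h2
          (by intro p hp; rcases List.mem_append.mp hp with hp | hp
              · exact h1 p hp
              · simp at hp; simp [hp, hx]) ht
        rw [List.foldl_cons, hins, hih]
        simp [hx]
      · -- x.2 = 2 : after a3 ++ a2, before a1
        have hno : ∀ y ∈ a3 ++ a2,
            (fun a b : String × Int => decide (b.2 < a.2)) x y = false := by
          intro y hy'
          rcases List.mem_append.mp hy' with hy' | hy'
          · simp [h3 y hy', hx]
          · simp [h2 y hy', hx]
        have hyes : ∀ y ∈ a1,
            (fun a b : String × Int => decide (b.2 < a.2)) x y = true := by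
          intro y hy'; simp [h1 y hy', hx]
        have hins : PySem.List.insertBy (fun a b : String × Int => decide (b.2 < a.2)) x
            (a3 ++ (a2 ++ a1)) = a3 ++ ((a2 ++ [x]) ++ a1) := by
          rw [← List.append_assoc, insertBy_append_of_not_before _ _ _ _ hno,
            insertBy_of_forall_before _ _ _ hyes]
          simp
        have hih := ih a3 (a2 ++ [x]) a1 h3
          (by intro p hp; rcases List.mem_append.mp hp with hp | hp
              · exact h2 p hp
              · simp at hp; simp [hp, hx]) h1 ht
        rw [List.foldl_cons, hins, hih]
        simp [hx]
      · -- x.2 = 3 : after a3, before a2 ++ a1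
        have hno : ∀ y ∈ a3,
            (fun a b : String × Int => decide (b.2 < a.2)) x y = false := by
          intro y hy'; simp [h3 y hy', hx]
        have hyes : ∀ y ∈ a2 ++ a1,
            (fun a b : String × Int => decide (b.2 < a.2)) x y = true := by
          intro y hy'
          rcases List.mem_append.mp hy' with hy' | hy'
          · simp [h2 y hy', hx]
          · simp [h1 y hy', hx]
        have hins : PySem.List.insertBy (fun a b : String × Int => decide (b.2 < a.2)) x
            (a3 ++ (a2 ++ a1)) = (a3 ++ [x]) ++ (a2 ++ a1) := by
          rw [insertBy_append_of_not_before _ _ _ _ hno,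
            insertBy_of_forall_before _ _ _ hyes]
          simp
        have hih := ih (a3 ++ [x]) a2 a1
          (by intro p hp; rcases List.mem_append.mp hp with hp | hp
              · exact h3 p hp
              · simp at hp; simp [hp, hx]) h2 h1 ht
        rw [List.foldl_cons, hins, hih]
        simp [hx]

-- A's first loop is the grouping modify-loop
lemma flipped_getD (priorityDict : List (String × Int)) (w : Int) :
    (priorityDict.foldl (fun flipped kv =>
        if flipped.contains kv.2 = false then flipped.insert kv.2 [kv.1]
        else flipped.insert kv.2 ((flipped.getD kv.2 []) ++ [kv.1])) PySem.Dict.empty).getD w []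
    = (priorityDict.filter (fun kv => kv.2 == w)).map (fun kv => kv.1) := by
  have hstep : priorityDict.foldl (fun flipped kv =>
        if flipped.contains kv.2 = false then flipped.insert kv.2 [kv.1]
        else flipped.insert kv.2 ((flipped.getD kv.2 []) ++ [kv.1])) PySem.Dict.empty
      = priorityDict.foldl (fun d kv => d.modify kv.2 [] (· ++ [kv.1])) PySem.Dict.empty := by
    apply PySem.List.foldl_congr_mem
    intro d kv _
    by_cases hc : d.contains kv.2 = false
    · simp [hc, PySem.Dict.modify, PySem.Dict.getD_of_not_contains d [] hc]
    · simp [hc, PySem.Dict.modify]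
  rw [hstep]
  have hmap : priorityDict.foldl (fun d kv => d.modify kv.2 [] (· ++ [kv.1])) PySem.Dict.empty
      = (priorityDict.map (fun kv => (kv.2, kv.1))).foldl
          (fun d p => d.modify p.1 [] (· ++ [p.2])) PySem.Dict.empty := by
    rw [List.foldl_map]
  rw [hmap, PySem.Dict.getD_foldl_modify_append]
  simp [List.filter_map, List.map_map, Function.comp_def]

-- the filters of B's eligible list are the reversed weight buckets
lemma eligible_filter (priorityDict : List (String × Int)) (w : Int)
    (hw : w = 1 ∨ w = 2 ∨ w = 3) :
    (priorityDict.reverse.filter (fun p => p.2 == 1 || p.2 == 2 || p.2 == 3)).filter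
        (fun p => p.2 == w)
    = (priorityDict.filter (fun p => p.2 == w)).reverse := by
  rw [List.filter_filter, ← List.filter_reverse]
  apply List.filter_congr
  intro p _
  rcases hw with rfl | rfl | rfl
  · by_cases h : p.2 = 1 <;> simp [h]
  · by_cases h : p.2 = 2 <;> simp [h]
  · by_cases h : p.2 = 3 <;> simp [h]

-- ===== VERDICT (by name: the statement is the Claim_ definition above) =====
theorem prioritySorter_spec : Claim_equal_prioritySorter := by
  intro pd _
  unfold Spec_prioritySorter prioritySorter prioritySorter_alt
  set flipped : PySem.Dict Int (List String) :=
    pd.foldl (fun flipped kv =>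
      if flipped.contains kv.2 = false then flipped.insert kv.2 [kv.1]
      else flipped.insert kv.2 ((flipped.getD kv.2 []) ++ [kv.1])) PySem.Dict.empty with hflip
  -- each weight step of A's second loop appends the whole bucket
  have hstep : ∀ (acc : List String) (w : Int),
      (if flipped.keys.contains w then
        (PySem.List.pyRange 0 ((flipped.getD w []).length : Int)).foldl
          (fun acc2 i => acc2 ++ [PySem.List.pyGetD (flipped.getD w []) i ""]) acc
      else acc) = acc ++ (pd.filter (fun kv => kv.2 == w)).map (fun kv => kv.1) := by
    intro acc w
    by_cases hc : flipped.keys.contains w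
    · rw [if_pos hc,
        PySem.List.foldl_pyRange_zero_pyGetD' (flipped.getD w []) ""
          (fun acc x => acc ++ [x]) acc,
        PySem.List.foldl_append_singleton_eq_self, hflip, flipped_getD]
    · rw [if_neg hc]
      have hnc : flipped.contains w = false := by
        rw [← Bool.not_eq_true, PySem.Dict.contains_iff_mem_keys]
        simpa using hc
      have : flipped.getD w [] = [] := PySem.Dict.getD_of_not_contains flipped [] hnc
      rw [hflip] at this
      rw [flipped_getD] at this
      rw [this, List.append_nil]
  have hrange : PySem.List.pyRange 1 4 = [1, 2, 3] := by decide
  rw [hrange]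
  simp only [List.foldl_cons, List.foldl_nil, hstep, List.nil_append]
  -- B's side: the stable descending sort is the three filters
  have hy : ∀ p ∈ pd.reverse.filter (fun p => p.2 == 1 || p.2 == 2 || p.2 == 3),
      p.2 = 1 ∨ p.2 = 2 ∨ p.2 = 3 := by
    intro p hp
    have := List.of_mem_filter hp
    simp at this
    tauto
  have hsorted : PySem.List.sorted
        (pd.reverse.filter (fun p => p.2 == 1 || p.2 == 2 || p.2 == 3)) (fun p => p.2) true
      = (pd.filter (fun p => p.2 == 3)).reverse ++
        ((pd.filter (fun p => p.2 == 2)).reverse ++ (pd.filter (fun p => p.2 == 1)).reverse) := by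
    rw [PySem.List.sorted_rev_eq_foldl_insertBy]
    have h := sortAux (pd.reverse.filter (fun p => p.2 == 1 || p.2 == 2 || p.2 == 3))
      [] [] [] (by simp) (by simp) (by simp) hy
    simp only [List.nil_append] at h
    rw [eligible_filter pd 3 (by tauto), eligible_filter pd 2 (by tauto),
      eligible_filter pd 1 (by tauto)] at h
    simpa using h
  simp only [hsorted]
  simp [List.reverse_append, List.map_append, List.map_reverse]
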